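-- pv_equiv track=rewrite | github.com/g1tsys/coding | Day 1 - Score 100/532-contains_seven_or_more.py | restore_order
-- ===== SOURCE A (Python) =====
-- def contains_seven_or_multiple(n):
--     """
--     检查数字是否是7的倍数或者包含7
--     :param n: 待检查的数字
--     :return: 如果数字是7的倍数或者包含7，返回True，否则返回False
--     """
--     return n % 7 == 0 or '7' in str(n)
--
-- def restore_order(over_counts):
--     """
--     还原正确顺序的喊“过”次数
--     :param over_counts: 打乱顺序的喊“过”次数
--     :return: 正确顺序的喊“过”次数
--     """
--     n = len(over_counts)  # 获取人数，即数组长度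
--     order_counts = [0] * n  # 初始化每个人的喊“过”次数为0
--     current_number = 1  # 从数字1开始喊
--     current_person = 0  # 从编号为1的人开始（0索引表示编号1）
--
--     # 总的“过”次数是输入数组的总和
--     total_over_count = sum(over_counts)
--
--     # 当“过”次数没有达到总的“过”次数时，一直循环
--     while sum(order_counts) < total_over_count:
--         # 如果当前数字需要喊“过”
--         if contains_seven_or_multiple(current_number):
--             order_counts[current_person] += 1  # 当前编号的人“过”次数加1
--
--         # 当前数字增加1，移动到下一个人
--         current_number += 1
--         current_person = (current_person + 1) % n  # 确保当前人编号循环在0到n-1之间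
--
--     return order_counts
-- ===== SOURCE B (Python) =====
-- def contains_seven_or_multiple(n):
--     return n % 7 == 0 or '7' in str(n)
--
--
-- def restore_order(over_counts):
--     n = len(over_counts)
--     remaining = sum(over_counts)
--     result = [0] * n
--     base = 1  # first number of the current round of n consecutive numbers
--     while remaining > 0:
--         # one whole round as a 0/1 hit vector
--         row = [1 if contains_seven_or_multiple(base + k) else 0 for k in range(n)]
--         s = sum(row)
--         if s <= remaining:
--             # the whole round fits: add it elementwise
--             result = [a + b for a, b in zip(result, row)]
--             remaining -= s
--         else:
--             # final partial round: take the row's hits left to right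
--             for k in range(n):
--                 if remaining == 0:
--                     break
--                 if row[k]:
--                     result[k] += 1
--                     remaining -= 1
--         base += n
--     return result
-- ===== Notes on version B (the rewrite author's own statement) =====
-- stated objective: alternative
-- what changed: A walks one number at a time, updating one array cell per step and re-summing the whole output array before every step; B processes whole rounds of n consecutive numbers at once: it builds the round's 0/1 hit vector, adds it elementwise while the round fits into the remaining total, and handles only the final partial round hit by hit (intended as faster since it drops the per-step re-sum; measured 1.49x at the largest size, below the 1.5x confirmation bar).
import Mathlib
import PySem

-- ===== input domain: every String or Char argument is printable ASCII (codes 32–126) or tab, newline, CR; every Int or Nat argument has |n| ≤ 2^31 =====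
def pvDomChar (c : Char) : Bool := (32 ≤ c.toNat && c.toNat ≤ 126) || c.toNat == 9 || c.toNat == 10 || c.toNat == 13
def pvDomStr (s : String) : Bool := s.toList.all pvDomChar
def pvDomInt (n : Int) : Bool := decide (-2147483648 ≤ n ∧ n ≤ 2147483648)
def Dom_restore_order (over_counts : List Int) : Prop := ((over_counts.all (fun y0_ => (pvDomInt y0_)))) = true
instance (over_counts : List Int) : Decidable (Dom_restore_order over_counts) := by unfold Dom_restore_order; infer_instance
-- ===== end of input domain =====

-- B replaces A's per-number loop (which re-sums the whole output array before every
-- step) by round-blocked processing: build the 0/1 hit vector of a whole round of n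
-- consecutive numbers, add it elementwise while it fits into the remaining total, and
-- walk only the final partial round hit by hit; objective: alternative decomposition.

-- ===== PORT A =====

-- n % 7 == 0 or '7' in str(n)   (helper of the original module, used by both programs)
def contains_seven_or_multiple (n : Int) : Bool :=
  PySem.Int.mod n 7 == 0 || PySem.Str.isIn "7" (PySem.Int.toStr n)

-- A's while-loop. `fuel` is a totality guard only: at least one of any 7 consecutive
-- numbers is a hit, so 7*total+7 iterations always reach the loop's exit condition
-- (proved by pv_loop_eq below); the loop itself is Python's, step for step.
def restore_order_loop (fuel : Nat) (total : Int) (counts : List Int) (num person : Int) : List Int :=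
  match fuel with
  | 0 => counts
  | f + 1 =>
    if counts.sum < total then
      restore_order_loop f total
        (if contains_seven_or_multiple num then counts.modify person.toNat (· + 1) else counts)
        (num + 1) (PySem.Int.mod (person + 1) (counts.length : Int))
    else counts

def restore_order (over_counts : List Int) : List Int :=
  let n := over_counts.length
  let total := over_counts.sum
  restore_order_loop (7 * total.toNat + 7) total (List.replicate n 0) 1 0

-- ===== PORT B =====

-- row = [1 if contains_seven_or_multiple(base + k) else 0 for k in range(n)]
def restore_order_row (n : Nat) (base : Int) : List Int :=
  (List.range n).map (fun (k : Nat) => if contains_seven_or_multiple (base + (k : Int)) then (1 : Int) else 0)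

-- the inner for-loop of the final partial round ('for k in range(n): if remaining == 0:
-- break; if row[k]: result[k] += 1; remaining -= 1'); row[k] is always in range here
def restore_order_inner (ks : List Nat) (row : List Int) (result : List Int) (remaining : Int) :
    List Int × Int :=
  match ks with
  | [] => (result, remaining)
  | k :: rest =>
    if remaining == 0 then (result, remaining)
    else if row.getD k 0 ≠ 0 then
      restore_order_inner rest row (result.modify k (· + 1)) (remaining - 1)
    else
      restore_order_inner rest row result remaining

-- B's while-loop over whole rounds. `fuel` is a totality guard only (each round of n
-- numbers lowers the step-potential by at least n, see pv_rounds_eq below).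
def restore_order_rounds (fuel : Nat) (remaining : Int) (result : List Int) (base : Int) : List Int :=
  match fuel with
  | 0 => result
  | f + 1 =>
    if 0 < remaining then
      let row := restore_order_row result.length base
      let s := row.sum
      if s ≤ remaining then
        restore_order_rounds f (remaining - s)
          (List.zipWith (fun a b => a + b) result row) (base + (result.length : Int))
      else
        let pr := restore_order_inner (List.range result.length) row result remaining
        restore_order_rounds f pr.2 pr.1 (base + (result.length : Int))
    else result

def restore_order_alt (over_counts : List Int) : List Int :=
  let n := over_counts.length
  let remaining := over_counts.sum
  restore_order_rounds (7 * remaining.toNat + 7) remaining (List.replicate n 0) 1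

-- ===== PRECONDITION & SPEC =====
def Spec_restore_order (over_counts : List Int) (out : List Int) : Prop := out = restore_order_alt over_counts
instance (over_counts : List Int) (out : List Int) : Decidable (Spec_restore_order over_counts out) := by unfold Spec_restore_order; infer_instance

-- ===== CLAIM (what is proved, stated in full; the proofs are below) =====
def Claim_equal_restore_order : Prop := ∀ (over_counts : List Int), Dom_restore_order over_counts → Spec_restore_order over_counts (restore_order over_counts)

-- ===== LEMMAS AND PROOFS =====

-- incrementing an in-range entry raises the sum by exactly 1
theorem pv_sum_modify (l : List Int) (i : Nat) (h : i < l.length) :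
    (l.modify i (· + 1)).sum = l.sum + 1 := by
  induction l generalizing i with
  | nil => simp at h
  | cons a t ih =>
    cases i with
    | zero => simp [List.modify]; ring
    | succ j =>
      have hm : (a :: t).modify (j + 1) (· + 1) = a :: t.modify j (· + 1) := by simp
      rw [hm, List.sum_cons, List.sum_cons, ih j (by simpa using h)]
      ring

-- proof-only helper: the stream of person indices of the first k hits from num on
def collect_hits (fuel : Nat) (n : Int) (k : Nat) (num : Int) : List Int :=
  match fuel, k with
  | 0, _ => []
  | _ + 1, 0 => []
  | f + 1, k' + 1 =>
    if contains_seven_or_multiple num then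
      PySem.Int.mod (num - 1) n :: collect_hits f n k' (num + 1)
    else
      collect_hits f n (k' + 1) (num + 1)

-- proof-only helpers: hit count and person indices of the segment [num, num+m)
def pv_cnt (num : Int) (m : Nat) : Nat :=
  match m with
  | 0 => 0
  | m + 1 => (if contains_seven_or_multiple num then 1 else 0) + pv_cnt (num + 1) m

def pv_seg (n : Int) (num : Int) (m : Nat) : List Int :=
  match m with
  | 0 => []
  | m + 1 =>
    (if contains_seven_or_multiple num then [PySem.Int.mod (num - 1) n] else []) ++
      pv_seg n (num + 1) m

-- one-step unfoldings (definitional)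
theorem pv_loop_succ (f : Nat) (total : Int) (counts : List Int) (num person : Int) :
    restore_order_loop (f + 1) total counts num person =
      if counts.sum < total then
        restore_order_loop f total
          (if contains_seven_or_multiple num then counts.modify person.toNat (· + 1) else counts)
          (num + 1) (PySem.Int.mod (person + 1) (counts.length : Int))
      else counts := rfl

theorem pv_collect_succ (f : Nat) (n : Int) (k : Nat) (num : Int) :
    collect_hits (f + 1) n (k + 1) num =
      if contains_seven_or_multiple num then
        PySem.Int.mod (num - 1) n :: collect_hits f n k (num + 1)
      else collect_hits f n (k + 1) (num + 1) := rfl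

theorem pv_collect_zero (g : Nat) (n : Int) (num : Int) :
    collect_hits g n 0 num = [] := by
  cases g <;> rfl

theorem pv_rounds_succ (f : Nat) (remaining : Int) (result : List Int) (base : Int) :
    restore_order_rounds (f + 1) remaining result base =
      if 0 < remaining then
        let row := restore_order_row result.length base
        let s := row.sum
        if s ≤ remaining then
          restore_order_rounds f (remaining - s)
            (List.zipWith (fun a b => a + b) result row) (base + (result.length : Int))
        else
          let pr := restore_order_inner (List.range result.length) row result remaining
          restore_order_rounds f pr.2 pr.1 (base + (result.length : Int))
      else result := rfl

theorem pv_rounds_exit (f : Nat) (remaining : Int) (result : List Int) (base : Int)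
    (h : ¬ 0 < remaining) : restore_order_rounds f remaining result base = result := by
  cases f with
  | zero => rfl
  | succ f => rw [pv_rounds_succ, if_neg h]

-- a number that is no hit is in particular no multiple of 7
theorem pv_nohit_not_dvd (num : Int) (hh : ¬ contains_seven_or_multiple num = true) :
    ¬ (7 : Int) ∣ num := by
  simp [contains_seven_or_multiple] at hh
  exact hh.1

theorem pv_nohit_mod (num : Int) (hh : ¬ contains_seven_or_multiple num = true) :
    ¬ num % 7 = 0 := by
  intro h0
  exact pv_nohit_not_dvd num hh (Int.dvd_of_emod_eq_zero h0)

-- the tally fold preserves the length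
theorem pv_length_foldl (hits : List Int) : ∀ (counts : List Int),
    (hits.foldl (fun c p => c.modify p.toNat (· + 1)) counts).length = counts.length := by
  induction hits with
  | nil => intro counts; rfl
  | cons p rest ih =>
    intro counts
    simp only [List.foldl_cons, ih, List.length_modify]

-- element i of the tally fold is counts[i] plus the number of hits at i
theorem pv_foldl_getElem (hits : List Int) : ∀ (counts : List Int),
    (∀ p ∈ hits, 0 ≤ p ∧ p < (counts.length : Int)) → ∀ (i : Nat) (hi : i < counts.length),
    (hits.foldl (fun c p => c.modify p.toNat (· + 1)) counts)[i]'(by rw [pv_length_foldl]; exact hi)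
      = counts[i] + (hits.count (i : Int) : Int) := by
  induction hits with
  | nil => intro counts _ i hi; simp
  | cons p rest ih =>
    intro counts hb i hi
    have hp := hb p (List.mem_cons_self)
    have hb' : ∀ q ∈ rest, 0 ≤ q ∧ q < ((counts.modify p.toNat (· + 1)).length : Int) := by
      intro q hq; rw [List.length_modify]; exact hb q (List.mem_cons_of_mem _ hq)
    have hi' : i < (counts.modify p.toNat (· + 1)).length := by rwa [List.length_modify]
    have := ih (counts.modify p.toNat (· + 1)) hb' i hi'
    simp only [List.foldl_cons]
    rw [this, List.getElem_modify, List.count_cons]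
    by_cases hpi : p = (i : Int)
    · have hti : p.toNat = i := by omega
      simp [hpi]
      ring
    · have hti : p.toNat ≠ i := by omega
      simp [hpi, hti]

-- A's loop equals the tally fold of the hit-index stream, for any two sufficient fuels
theorem pv_loop_eq (total : Int) : ∀ (f g : Nat) (counts : List Int) (num person : Int),
    counts ≠ [] → person = PySem.Int.mod (num - 1) (counts.length : Int) →
    7 * (total - counts.sum).toNat + (7 - num % 7).toNat % 7 ≤ f →
    7 * (total - counts.sum).toNat + (7 - num % 7).toNat % 7 ≤ g →
    restore_order_loop f total counts num person =
      (collect_hits g (counts.length : Int) (total - counts.sum).toNat num).foldl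
        (fun c p => c.modify p.toNat (· + 1)) counts := by
  intro f
  induction f with
  | zero =>
    intro g counts num person hne hp hf hg
    have hk : (total - counts.sum).toNat = 0 := by omega
    rw [hk, pv_collect_zero]
    rfl
  | succ f ih =>
    intro g counts num person hne hp hf hg
    have hL : (0 : Int) < (counts.length : Int) := by
      have := List.length_pos_iff.mpr hne; exact_mod_cast this
    rw [pv_loop_succ]
    by_cases hlt : counts.sum < total
    · rw [if_pos hlt]
      obtain ⟨k', hk⟩ : ∃ k', (total - counts.sum).toNat = k' + 1 :=
        ⟨(total - counts.sum).toNat - 1, by omega⟩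
      obtain ⟨g', hgs⟩ : ∃ g', g = g' + 1 := ⟨g - 1, by omega⟩
      subst hgs
      rw [hk, pv_collect_succ]
      have hmod : PySem.Int.mod (person + 1) (counts.length : Int)
          = PySem.Int.mod ((num + 1) - 1) (counts.length : Int) := by
        rw [hp, PySem.Int.mod_eq_emod_of_pos hL, PySem.Int.mod_eq_emod_of_pos hL,
          PySem.Int.mod_eq_emod_of_pos hL, Int.emod_add_emod]
        norm_num
      by_cases hh : contains_seven_or_multiple num = true
      · rw [if_pos hh, if_pos hh]
        have hidx : person.toNat < counts.length := by
          have h0 : 0 ≤ person := by rw [hp]; exact PySem.Int.mod_nonneg _ hL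
          have h1 : person < (counts.length : Int) := by rw [hp]; exact PySem.Int.mod_lt _ hL
          omega
        have hsum : (counts.modify person.toNat (· + 1)).sum = counts.sum + 1 :=
          pv_sum_modify counts person.toNat hidx
        have hlen : (counts.modify person.toNat (· + 1)).length = counts.length :=
          List.length_modify ..
        have hne' : counts.modify person.toNat (· + 1) ≠ [] := by
          intro hc
          have h0 := congrArg List.length hc
          rw [hlen] at h0
          simp only [List.length_nil] at h0
          exact hne (List.length_eq_zero_iff.mp h0)
        have hk' : (total - (counts.modify person.toNat (· + 1)).sum).toNat = k' := by
          rw [hsum]; omega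
        have ihe := ih g' (counts.modify person.toNat (· + 1)) (num + 1)
          (PySem.Int.mod (person + 1) (counts.length : Int))
          hne' (by rw [hlen]; exact hmod)
          (by rw [hk']; omega) (by rw [hk']; omega)
        rw [ihe, hlen, hk']
        simp only [List.foldl_cons]
        rw [← hp]
      · rw [if_neg hh, if_neg hh]
        have hd : ¬ (7 : Int) ∣ num := pv_nohit_not_dvd num hh
        have ihe := ih g' counts (num + 1)
          (PySem.Int.mod (person + 1) (counts.length : Int))
          hne hmod (by omega) (by omega)
        rw [ihe, hk]
    · rw [if_neg hlt]
      have hk : (total - counts.sum).toNat = 0 := by omega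
      rw [hk, pv_collect_zero]
      rfl

-- ---------- B-side: segment theory ----------

theorem pv_cnt_succ (num : Int) (m : Nat) :
    pv_cnt num (m + 1) = (if contains_seven_or_multiple num then 1 else 0) + pv_cnt (num + 1) m := rfl

theorem pv_seg_succ (n num : Int) (m : Nat) :
    pv_seg n num (m + 1) =
      (if contains_seven_or_multiple num then [PySem.Int.mod (num - 1) n] else []) ++
        pv_seg n (num + 1) m := rfl

theorem pv_seg_length (n : Int) : ∀ (m : Nat) (num : Int),
    (pv_seg n num m).length = pv_cnt num m := by
  intro m
  induction m with
  | zero => intro num; rfl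
  | succ m ih =>
    intro num
    rw [pv_seg_succ, pv_cnt_succ, List.length_append, ih]
    by_cases hh : contains_seven_or_multiple num = true <;> simp [hh]

theorem pv_seg_nil_of_cnt (n : Int) (m : Nat) (num : Int) (h : pv_cnt num m = 0) :
    pv_seg n num m = [] := by
  have := pv_seg_length n m num
  rw [h] at this
  exact List.length_eq_zero_iff.mp this

-- collect_hits splits at any segment whose hits all fit into k
theorem pv_collect_split (n : Int) : ∀ (m f k : Nat) (num : Int),
    m ≤ f → pv_cnt num m ≤ k →
    collect_hits f n k num =
      pv_seg n num m ++ collect_hits (f - m) n (k - pv_cnt num m) (num + (m : Int)) := by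
  intro m
  induction m with
  | zero =>
    intro f k num _ _
    simp [pv_seg, pv_cnt]
  | succ m ih =>
    intro f k num hf hc
    obtain ⟨f', rfl⟩ : ∃ f', f = f' + 1 := ⟨f - 1, by omega⟩
    have hcast : num + ((m + 1 : Nat) : Int) = (num + 1) + (m : Int) := by push_cast; ring
    by_cases hh : contains_seven_or_multiple num = true
    · rw [pv_cnt_succ, if_pos hh] at hc ⊢
      obtain ⟨k', rfl⟩ : ∃ k', k = k' + 1 := ⟨k - 1, by omega⟩
      have h1 : f' + 1 - (m + 1) = f' - m := by omega
      have h2 : k' + 1 - (1 + pv_cnt (num + 1) m) = k' - pv_cnt (num + 1) m := by omega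
      rw [pv_collect_succ, if_pos hh, pv_seg_succ, if_pos hh,
        ih f' k' (num + 1) (by omega) (by omega), h1, h2]
      simp only [List.cons_append, List.nil_append, hcast]
    · rw [pv_cnt_succ, if_neg hh] at hc ⊢
      cases k with
      | zero =>
        have hc0 : pv_cnt (num + 1) m = 0 := by omega
        rw [pv_collect_zero, pv_seg_succ, if_neg hh, pv_seg_nil_of_cnt _ _ _ hc0, hc0]
        norm_num [pv_collect_zero]
      | succ k' =>
        have h1 : f' + 1 - (m + 1) = f' - m := by omega
        have h2 : k' + 1 - (0 + pv_cnt (num + 1) m) = k' + 1 - pv_cnt (num + 1) m := by omega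
        rw [pv_collect_succ, if_neg hh, pv_seg_succ, if_neg hh,
          ih f' (k' + 1) (num + 1) (by omega) (by simpa using hc), h1, h2]
        simp only [List.nil_append, hcast]

-- step-potential accounting: a segment of m numbers lowers 7*k + (7 - num%7)%7 by ≥ m
theorem pv_nu : ∀ (m : Nat) (num : Int) (k : Nat), pv_cnt num m ≤ k →
    7 * (k - pv_cnt num m) + (7 - (num + (m : Int)) % 7).toNat % 7 + m ≤
      7 * k + (7 - num % 7).toNat % 7 := by
  intro m
  induction m with
  | zero => intro num k _; simp [pv_cnt]
  | succ m ih =>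
    intro num k hc
    have hcast : num + ((m + 1 : Nat) : Int) = (num + 1) + (m : Int) := by push_cast; ring
    rw [hcast]
    by_cases hh : contains_seven_or_multiple num = true
    · rw [pv_cnt_succ, if_pos hh] at hc ⊢
      obtain ⟨k', rfl⟩ : ∃ k', k = k' + 1 := ⟨k - 1, by omega⟩
      have hih := ih (num + 1) k' (by omega)
      have hb : (7 - (num + 1) % 7).toNat % 7 ≤ 6 := by omega
      omega
    · rw [pv_cnt_succ, if_neg hh] at hc ⊢
      have hih := ih (num + 1) k (by omega)
      have h7 : ¬ num % 7 = 0 := pv_nohit_mod num hh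
      omega

-- ---------- B-side: alignment and per-round lemmas ----------

theorem pv_align (n q j : Nat) (hj : j < n) :
    PySem.Int.mod ((q : Int) * n + 1 + (j : Int) - 1) (n : Int) = (j : Int) := by
  have hn : (0 : Int) < (n : Int) := by exact_mod_cast (show 0 < n by omega)
  rw [PySem.Int.mod_eq_emod_of_pos hn]
  have he : (q : Int) * n + 1 + (j : Int) - 1 = (j : Int) + (n : Int) * (q : Int) := by ring
  rw [he, Int.add_mul_emod_self_left]
  exact Int.emod_eq_of_lt (by positivity) (by exact_mod_cast hj)

theorem pv_row_length (n : Nat) (base : Int) : (restore_order_row n base).length = n := by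
  simp [restore_order_row]

theorem pv_row_getElem (n : Nat) (base : Int) (j : Nat) (hj : j < n) :
    (restore_order_row n base)[j]'(by rw [pv_row_length]; exact hj) =
      if contains_seven_or_multiple (base + (j : Int)) then 1 else 0 := by
  unfold restore_order_row
  rw [List.getElem_map, List.getElem_range]

theorem pv_row_getD (n : Nat) (base : Int) (j : Nat) (hj : j < n) :
    (restore_order_row n base).getD j 0 =
      if contains_seven_or_multiple (base + (j : Int)) then 1 else 0 := by
  rw [List.getD_eq_getElem _ _ (by rw [pv_row_length]; exact hj), pv_row_getElem n base j hj]

theorem pv_cnt_snoc : ∀ (m : Nat) (num : Int),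
    pv_cnt num (m + 1) = pv_cnt num m + (if contains_seven_or_multiple (num + (m : Int)) then 1 else 0) := by
  intro m
  induction m with
  | zero =>
    intro num
    simp [pv_cnt]
  | succ m ih =>
    intro num
    rw [pv_cnt_succ, ih (num + 1), pv_cnt_succ]
    have hcast : num + 1 + (m : Int) = num + ((m + 1 : Nat) : Int) := by push_cast; ring
    rw [hcast, Nat.add_assoc]

theorem pv_row_sum (n : Nat) (base : Int) :
    (restore_order_row n base).sum = (pv_cnt base n : Int) := by
  induction n with
  | zero => simp [restore_order_row, pv_cnt]
  | succ m ih =>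
    rw [pv_cnt_snoc]
    have hrow : restore_order_row (m + 1) base =
        restore_order_row m base ++ [if contains_seven_or_multiple (base + (m : Int)) then (1 : Int) else 0] := by
      simp [restore_order_row, List.range_succ]
    rw [hrow, List.sum_append, ih]
    by_cases hh : contains_seven_or_multiple (base + (m : Int)) = true <;> simp [hh]

theorem pv_seg_mem (n : Int) (hn : 0 < n) : ∀ (m : Nat) (num p : Int),
    p ∈ pv_seg n num m → 0 ≤ p ∧ p < n := by
  intro m
  induction m with
  | zero => intro num p hp; simp [pv_seg] at hp
  | succ m ih =>
    intro num p hp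
    rw [pv_seg_succ] at hp
    rcases List.mem_append.mp hp with h | h
    · by_cases hh : contains_seven_or_multiple num = true
      · rw [if_pos hh, List.mem_singleton] at h
        subst h
        exact ⟨PySem.Int.mod_nonneg _ hn, PySem.Int.mod_lt _ hn⟩
      · rw [if_neg hh] at h; simp at h
    · exact ih (num + 1) p h

-- occurrence count of person i in an aligned segment
theorem pv_seg_count (n q : Nat) : ∀ (m j : Nat), j + m ≤ n → ∀ (i : Nat), i < n →
    (pv_seg (n : Int) ((q : Int) * n + 1 + (j : Int)) m).count (i : Int) =
      if j ≤ i ∧ i < j + m ∧ contains_seven_or_multiple ((q : Int) * n + 1 + (i : Int)) then 1 else 0 := by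
  intro m
  induction m with
  | zero =>
    intro j _ i _
    rw [if_neg (by rintro ⟨h1, h2, -⟩; omega)]
    rfl
  | succ m ih =>
    intro j hjm i hi
    have hj : j < n := by omega
    rw [pv_seg_succ, List.count_append, pv_align n q j hj]
    have hcast : (q : Int) * n + 1 + (j : Int) + 1 = (q : Int) * n + 1 + ((j + 1 : Nat) : Int) := by
      push_cast; ring
    rw [hcast, ih (j + 1) (by omega) i hi]
    by_cases hij : i = j
    · subst hij
      have h2 : ¬ (i + 1 ≤ i ∧ i < i + 1 + m ∧ contains_seven_or_multiple ((q : Int) * n + 1 + (i : Int)) = true) := by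
        intro h
        exact absurd h.1 (by omega)
      rw [if_neg h2]
      by_cases hh : contains_seven_or_multiple ((q : Int) * n + 1 + (i : Int)) = true
      · have h3 : i ≤ i ∧ i < i + (m + 1) ∧ contains_seven_or_multiple ((q : Int) * n + 1 + (i : Int)) = true :=
          ⟨le_refl i, by omega, hh⟩
        rw [if_pos hh, if_pos h3]
        simp
      · have h3 : ¬ (i ≤ i ∧ i < i + (m + 1) ∧ contains_seven_or_multiple ((q : Int) * n + 1 + (i : Int)) = true) := by
          intro h; exact hh h.2.2
        rw [if_neg hh, if_neg h3]
        simp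
    · have hcnt0 : (if contains_seven_or_multiple ((q : Int) * n + 1 + (j : Int)) then [(j : Int)] else []).count (i : Int) = 0 := by
        by_cases hh : contains_seven_or_multiple ((q : Int) * n + 1 + (j : Int)) = true
        · rw [if_pos hh]
          have hne : ¬ ((j : Int) = (i : Int)) := by
            intro h; exact hij (by exact_mod_cast h.symm)
          simp [List.count_nil, hne]
        · rw [if_neg hh]; rfl
      rw [hcnt0, Nat.zero_add]
      by_cases h1 : j + 1 ≤ i ∧ i < j + 1 + m ∧ contains_seven_or_multiple ((q : Int) * n + 1 + (i : Int)) = true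
      · have h3 : j ≤ i ∧ i < j + (m + 1) ∧ contains_seven_or_multiple ((q : Int) * n + 1 + (i : Int)) = true :=
          ⟨by omega, by omega, h1.2.2⟩
        rw [if_pos h1, if_pos h3]
      · have h3 : ¬ (j ≤ i ∧ i < j + (m + 1) ∧ contains_seven_or_multiple ((q : Int) * n + 1 + (i : Int)) = true) := by
          intro h; exact h1 ⟨by omega, by omega, h.2.2⟩
        rw [if_neg h1, if_neg h3]

-- a full round's tally fold is the elementwise addition of the round's 0/1 row
theorem pv_full (n q : Nat) (result : List Int) (hr : result.length = n) :
    (pv_seg (n : Int) ((q : Int) * n + 1) n).foldl (fun c p => c.modify p.toNat (· + 1)) result =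
      List.zipWith (fun a b => a + b) result (restore_order_row n ((q : Int) * n + 1)) := by
  have hn0 : (0:Int) < (n:Int) ∨ n = 0 := by omega
  cases hn0 with
  | inr h0 =>
    subst h0
    have h0' : result = [] := List.length_eq_zero_iff.mp hr
    subst h0'
    simp [pv_seg]
  | inl hn =>
    have hb : ∀ p ∈ pv_seg (n : Int) ((q : Int) * n + 1) n, 0 ≤ p ∧ p < (result.length : Int) := by
      intro p hp
      rw [hr]
      exact pv_seg_mem _ hn n _ p hp
    apply List.ext_getElem
    · rw [pv_length_foldl, List.length_zipWith, pv_row_length, hr]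
      omega
    · intro i h1 h2
      have hi : i < result.length := by rw [pv_length_foldl] at h1; exact h1
      have hin : i < n := by omega
      rw [pv_foldl_getElem _ _ hb i hi, List.getElem_zipWith]
      have hseg := pv_seg_count n q n 0 (by omega) i hin
      have hcast : (q : Int) * n + 1 + ((0 : Nat) : Int) = (q : Int) * n + 1 := by push_cast; ring
      rw [hcast] at hseg
      rw [hseg, pv_row_getElem n _ i hin]
      by_cases hh : contains_seven_or_multiple ((q : Int) * n + 1 + (i : Int)) = true
      · rw [if_pos ⟨by omega, by omega, hh⟩, if_pos hh]; simp
      · rw [if_neg (by intro h; exact hh h.2.2), if_neg hh]; simp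

-- the final partial round: the inner break-loop equals the tally fold of the remaining hits
theorem pv_partial (n q : Nat) : ∀ (m j : Nat) (result : List Int) (remaining : Int) (f : Nat),
    result.length = n → j + m = n → 0 ≤ remaining →
    remaining.toNat < pv_cnt ((q : Int) * n + 1 + (j : Int)) m →
    7 * remaining.toNat + (7 - ((q : Int) * n + 1 + (j : Int)) % 7).toNat % 7 ≤ f →
    restore_order_inner (List.range' j m) (restore_order_row n ((q : Int) * n + 1)) result remaining =
      ((collect_hits f (n : Int) remaining.toNat ((q : Int) * n + 1 + (j : Int))).foldl
        (fun c p => c.modify p.toNat (· + 1)) result, 0) := by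
  intro m
  induction m with
  | zero =>
    intro j result remaining f _ _ h0 hc _
    simp [pv_cnt] at hc
  | succ m ih =>
    intro j result remaining f hr hjm h0 hc hf
    have hj : j < n := by omega
    rw [List.range'_succ]
    by_cases hz : remaining = 0
    · subst hz
      simp only [restore_order_inner, beq_self_eq_true]
      rw [show ((0:Int)).toNat = 0 from rfl, pv_collect_zero]
      rfl
    · have hpos : 0 < remaining := by omega
      obtain ⟨k', hk⟩ : ∃ k', remaining.toNat = k' + 1 := ⟨remaining.toNat - 1, by omega⟩
      obtain ⟨f', rfl⟩ : ∃ f', f = f' + 1 := ⟨f - 1, by omega⟩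
      have hbeq : (remaining == (0:Int)) = false := by simp [hz]
      simp only [restore_order_inner, hbeq, Bool.false_eq_true, if_false]
      rw [pv_row_getD n _ j hj]
      have hcast : (q : Int) * n + 1 + (j : Int) + 1 = (q : Int) * n + 1 + ((j + 1 : Nat) : Int) := by
        push_cast; ring
      by_cases hh : contains_seven_or_multiple ((q : Int) * n + 1 + (j : Int)) = true
      · rw [if_pos hh]
        have hne : ¬ ((1:Int) = 0) := by norm_num
        rw [if_pos hne]
        rw [hk, pv_collect_succ, if_pos hh, pv_align n q j hj]
        have hk' : (remaining - 1).toNat = k' := by omega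
        have hih := ih (j + 1) (result.modify j (· + 1)) (remaining - 1) f'
          (by rw [List.length_modify]; exact hr) (by omega) (by omega)
          (by rw [hk', ← hcast]; rw [pv_cnt_succ, if_pos hh] at hc; omega)
          (by rw [hk', ← hcast]
              have hb : (7 - ((q : Int) * n + 1 + (j : Int) + 1) % 7).toNat % 7 ≤ 6 := by omega
              omega)
        rw [hih, hcast, hk']
        simp only [List.foldl_cons, Int.toNat_natCast]
      · rw [if_neg hh]
        have heq0 : ¬ ((0:Int) ≠ 0) := by norm_num
        rw [if_neg heq0]
        rw [hk, pv_collect_succ, if_neg hh, ← hk]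
        have h7 : ¬ ((q : Int) * n + 1 + (j : Int)) % 7 = 0 := pv_nohit_mod _ hh
        have hih := ih (j + 1) result remaining f' hr (by omega) h0
          (by rw [← hcast]; rw [pv_cnt_succ, if_neg hh] at hc; omega)
          (by rw [← hcast]; omega)
        rw [hih, hcast]

-- B's round loop equals the tally fold of the hit-index stream
theorem pv_rounds_eq (n : Nat) : ∀ (f q : Nat) (remaining : Int) (result : List Int) (g : Nat),
    result.length = n →
    7 * remaining.toNat + (7 - ((q : Int) * n + 1) % 7).toNat % 7 ≤ f * n →
    7 * remaining.toNat + (7 - ((q : Int) * n + 1) % 7).toNat % 7 ≤ g →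
    restore_order_rounds f remaining result ((q : Int) * n + 1) =
      (collect_hits g (n : Int) remaining.toNat ((q : Int) * n + 1)).foldl
        (fun c p => c.modify p.toNat (· + 1)) result := by
  intro f
  induction f with
  | zero =>
    intro q remaining result g _ hf _
    have hk : remaining.toNat = 0 := by simp at hf; omega
    rw [hk, pv_collect_zero]
    rfl
  | succ f ih =>
    intro q remaining result g hr hf hg
    by_cases hpos : 0 < remaining
    swap
    · rw [pv_rounds_exit _ _ _ _ hpos]
      have hk : remaining.toNat = 0 := by omega
      rw [hk, pv_collect_zero]
      rfl
    · rw [pv_rounds_succ, if_pos hpos]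
      simp only [hr]
      set base : Int := (q : Int) * n + 1 with hbase
      have hs : (restore_order_row n base).sum = (pv_cnt base n : Int) := pv_row_sum n base
      set K := remaining.toNat with hK
      have hrem : remaining = (K : Int) := by omega
      have hnu := pv_nu n base K
      by_cases hfit : (restore_order_row n base).sum ≤ remaining
      · rw [if_pos hfit]
        have hcle : pv_cnt base n ≤ K := by
          rw [hs, hrem] at hfit; exact_mod_cast hfit
        have hng : n ≤ g := by have := hnu hcle; omega
        rw [pv_collect_split (n : Int) n g K base (by omega) hcle, List.foldl_append]
        have hbase' : base + (n : Int) = ((q + 1 : Nat) : Int) * n + 1 := by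
          rw [hbase]; push_cast; ring
        have hK' : (remaining - (restore_order_row n base).sum).toNat = K - pv_cnt base n := by
          rw [hs]; omega
        have hzl : (List.zipWith (fun a b => a + b) result (restore_order_row n base)).length = n := by
          rw [List.length_zipWith, pv_row_length, hr]; omega
        have hnu' := hnu hcle
        have hfn : (f + 1) * n = f * n + n := by ring
        have hb1 : 7 * (K - pv_cnt base n) + (7 - (base + (n : Int)) % 7).toNat % 7 ≤ f * n := by
          omega
        have hb2 : 7 * (K - pv_cnt base n) + (7 - (base + (n : Int)) % 7).toNat % 7 ≤ g - n := by
          omega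
        have hih := ih (q + 1) (remaining - (restore_order_row n base).sum)
          (List.zipWith (fun a b => a + b) result (restore_order_row n base)) (g - n) hzl
          (by rw [hK', ← hbase']; exact hb1)
          (by rw [hK', ← hbase']; exact hb2)
        rw [← hbase'] at hih
        rw [hK'] at hih
        have hfull := pv_full n q result hr
        rw [← hbase] at hfull
        rw [hfull, hih]
      · rw [if_neg hfit]
        have hclt : K < pv_cnt base n := by
          have : remaining < (pv_cnt base n : Int) := by rw [← hs]; omega
          omega
        have hpar := pv_partial n q n 0 result remaining g hr (by omega) (by omega)
          (by simpa using hclt)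
          (by have : base + ((0:Nat):Int) = base := by push_cast; ring
              rw [this]; exact hg)
        have hc0 : base + ((0:Nat):Int) = base := by push_cast; ring
        rw [hc0, ← hbase] at hpar
        rw [List.range_eq_range', hpar]
        exact pv_rounds_exit _ _ _ _ (by norm_num)

-- ===== VERDICT (by name: the statement is the Claim_ definition above) =====
theorem restore_order_spec : Claim_equal_restore_order := by
  intro over_counts _
  unfold Spec_restore_order
  by_cases hn : over_counts = []
  · subst hn
    decide
  · have hlen : 0 < over_counts.length := List.length_pos_iff.mpr hn
    set n := over_counts.length with hnn
    set total := over_counts.sum with ht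
    have hzl : (List.replicate n (0:Int)).length = n := List.length_replicate
    have hne : List.replicate n (0:Int) ≠ [] := by
      intro hc
      have h0 := congrArg List.length hc
      rw [hzl] at h0
      simp only [List.length_nil] at h0
      omega
    have hL : (0:Int) < ((List.replicate n (0:Int)).length : Int) := by
      rw [hzl]; exact_mod_cast hlen
    have hsz : (List.replicate n (0:Int)).sum = 0 := by simp
    -- A's side
    have keyA := pv_loop_eq total (7 * total.toNat + 7) (7 * total.toNat + 7)
      (List.replicate n 0) 1 0 hne
      (by rw [PySem.Int.mod_eq_emod_of_pos hL]; norm_num)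
      (by rw [hsz]; omega) (by rw [hsz]; omega)
    rw [hsz] at keyA
    have hsub : (total - 0).toNat = total.toNat := by omega
    rw [hsub, hzl] at keyA
    -- B's side
    have hmu : 7 * total.toNat + (7 - (((0 : Nat) : Int) * n + 1) % 7).toNat % 7 = 7 * total.toNat + 6 := by
      norm_num
      decide
    have hfb : 7 * total.toNat + 6 ≤ (7 * total.toNat + 7) * n :=
      calc 7 * total.toNat + 6 ≤ (7 * total.toNat + 7) * 1 := by omega
        _ ≤ (7 * total.toNat + 7) * n := Nat.mul_le_mul_left _ hlen
    have keyB := pv_rounds_eq n (7 * total.toNat + 7) 0 total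
      (List.replicate n 0) (7 * total.toNat + 7) hzl
      (by rw [hmu]; exact hfb) (by rw [hmu]; omega)
    have hb1 : ((0 : Nat) : Int) * n + 1 = (1 : Int) := by norm_num
    rw [hb1] at keyB
    show restore_order_loop (7 * total.toNat + 7) total (List.replicate n 0) 1 0 =
      restore_order_rounds (7 * total.toNat + 7) total (List.replicate n 0) 1
    rw [keyA, keyB]
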